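-- pv_equiv track=rewrite | github.com/tklee-yonsei/algorithms | lec09/03_suffix_array/suffixArray.py | find_all_patterns
-- ===== SOURCE A (Python) =====
-- def find_all_patterns(text, suffix_array, pattern):
--   """
--   패턴의 모든 출현 위치를 찾는 함수 (개선된 버전)
--
--   Args:
--       text: 원본 문자열
--       suffix_array: suffix array
--       pattern: 검색할 패턴
--
--   Returns:
--       패턴이 발견된 모든 위치의 리스트
--   """
--   results = []
--   n = len(suffix_array)
--   m = len(pattern)
--
--   # 첫 번째 출현 위치 찾기
--   left, right = 0, n - 1
--   first = -1
--
--   # 이진 탐색으로 첫 번째 출현 위치 찾기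
--   while left <= right:
--     mid = (left + right) // 2
--     suffix = text[suffix_array[mid]:]
--     suffix_prefix = suffix[:m] if len(suffix) >= m else suffix
--
--     if suffix_prefix >= pattern:
--       if suffix_prefix == pattern:
--         first = mid
--       right = mid - 1
--     else:
--       left = mid + 1
--
--   if first == -1:
--     return results
--
--   # 첫 번째 위치부터 연속된 모든 출현 위치 찾기
--   for i in range(first, n):
--     suffix = text[suffix_array[i]:]
--     if suffix.startswith(pattern):
--       results.append(suffix_array[i])
--     else:
--       break
--
--   return sorted(results)
-- ===== SOURCE B (Python) =====
-- def _find_first(text, pattern, suffix_array, lo, width, best):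
--     """Leftmost match via a width-based recursive binary search; compares only
--     len(pattern) characters of the text per probe."""
--     if width == 0:
--         return best
--     mid = lo + (width - 1) // 2
--     s = suffix_array[mid]
--     window = text[s:s + len(pattern)]
--     if window == pattern:
--         return _find_first(text, pattern, suffix_array, lo, (width - 1) // 2, mid)
--     if window > pattern:
--         return _find_first(text, pattern, suffix_array, lo, (width - 1) // 2, best)
--     return _find_first(text, pattern, suffix_array, mid + 1,
--                        width - (width - 1) // 2 - 1, best)
--
--
-- def find_all_patterns(text, suffix_array, pattern):
--     first = _find_first(text, pattern, suffix_array, 0, len(suffix_array), None)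
--     if first is None:
--         return []
--     m = len(pattern)
--     out = []
--     for s in suffix_array[first:]:
--         if text[s:s + m] != pattern:
--             break
--         out.append(s)
--     return sorted(out)
-- ===== Notes on version B (the rewrite author's own statement) =====
-- stated objective: alternative
-- what changed: B replaces A's (left,right) while-loop plus full-suffix slicing by a width-based recursive binary search that compares only the len(pattern)-character window text[s:s+m] per probe (never materializing text[s:]), and collects matches by iterating over the list tail suffix_array[first:] instead of index arithmetic; Pre_ excludes negative suffix-array entries, on which A's value comes from Python's accidental negative-slice wraparound.
-- outside the precondition, e.g. on find_all_patterns('ab', [-1], 'b'): A returns [-1], B returns []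
import Mathlib
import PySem

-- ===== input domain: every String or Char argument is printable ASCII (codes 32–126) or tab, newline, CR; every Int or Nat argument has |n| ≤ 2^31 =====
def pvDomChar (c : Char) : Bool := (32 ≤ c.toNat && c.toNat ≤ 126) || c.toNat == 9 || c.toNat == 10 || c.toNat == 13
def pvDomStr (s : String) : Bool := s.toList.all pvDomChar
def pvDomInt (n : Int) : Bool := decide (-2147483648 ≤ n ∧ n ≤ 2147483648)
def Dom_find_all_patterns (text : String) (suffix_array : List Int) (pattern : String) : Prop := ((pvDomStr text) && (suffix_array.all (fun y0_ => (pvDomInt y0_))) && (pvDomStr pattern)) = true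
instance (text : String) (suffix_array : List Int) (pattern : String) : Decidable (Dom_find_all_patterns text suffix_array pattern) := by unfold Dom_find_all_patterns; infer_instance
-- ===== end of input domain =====

-- B is a width-based recursive binary search comparing only the pattern-length
-- window text[s:s+m] per probe (never the whole suffix), then a takewhile-style
-- collection over the list tail; proved equal to A on nonnegative suffix arrays.

-- ===== PORT A =====
-- suffix = text[suffix_array[i]:]
def pvSuffixA (tl : List Char) (s : Int) : List Char := PySem.List.slice tl (some s) none
-- suffix_prefix = suffix[:m] if len(suffix) >= m else suffix
def pvSpA (tl pl : List Char) (s : Int) : List Char :=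
  if (pl.length : Int) ≤ ((pvSuffixA tl s).length : Int)
  then PySem.List.slice (pvSuffixA tl s) none (some (pl.length : Int))
  else pvSuffixA tl s

-- A's binary-search while-loop (state left/right/first); 'suffix_prefix >= pattern' is ported as '¬ … < pattern'
def pvSearchA (tl pl : List Char) (sa : List Int) (left right first : Int) : Int :=
  if h : left ≤ right then
    if ¬ pvSpA tl pl (PySem.List.pyGetD sa (PySem.Int.floordiv (left + right) 2) 0) < pl then
      pvSearchA tl pl sa left (PySem.Int.floordiv (left + right) 2 - 1)
        (if pvSpA tl pl (PySem.List.pyGetD sa (PySem.Int.floordiv (left + right) 2) 0) = pl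
         then PySem.Int.floordiv (left + right) 2 else first)
    else pvSearchA tl pl sa (PySem.Int.floordiv (left + right) 2 + 1) right first
  else first
termination_by (right + 1 - left).toNat
decreasing_by
  · have := PySem.Int.floordiv_two_mid_bounds h; omega
  · have := PySem.Int.floordiv_two_mid_bounds h; omega

-- A's 'for i in range(first, n): … else: break' collection loop
def pvScanA (tl pl : List Char) (sa : List Int) (n i : Int) (acc : List Int) : List Int :=
  if _h : i < n then
    if PySem.Chars.startswith (pvSuffixA tl (PySem.List.pyGetD sa i 0)) pl then
      pvScanA tl pl sa n (i + 1) (acc ++ [PySem.List.pyGetD sa i 0])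
    else acc
  else acc
termination_by (n - i).toNat
decreasing_by omega

def find_all_patterns (text : String) (suffix_array : List Int) (pattern : String) : List Int :=
  let tl := text.toList
  let pl := pattern.toList
  let n : Int := suffix_array.length
  let first := pvSearchA tl pl suffix_array 0 (n - 1) (-1)
  if first = -1 then []
  else PySem.List.sorted (pvScanA tl pl suffix_array n first []) (fun x => x) false

-- ===== PORT B =====
-- window = text[s:s+len(pattern)]
def pvWinB (tl : List Char) (s : Int) (m : Nat) : List Char :=
  PySem.List.slice tl (some s) (some (s + (m : Int)))

-- _find_first: width-based recursive binary search carrying the best match as an Option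
def pvFindFirstB (tl pl : List Char) (sa : List Int) : Int → Nat → Option Int → Option Int
  | _, 0, best => best
  | lo, width + 1, best =>
    let mid := lo + ((width / 2 : Nat) : Int)
    let w := pvWinB tl (PySem.List.pyGetD sa mid 0) pl.length
    if w = pl then pvFindFirstB tl pl sa lo (width / 2) (some mid)
    else if pl < w then pvFindFirstB tl pl sa lo (width / 2) best
    else pvFindFirstB tl pl sa (mid + 1) (width - width / 2) best
termination_by _ width _ => width
decreasing_by all_goals omega

-- B's 'for s in suffix_array[first:]: if window != pattern: break; out.append(s)'
def pvCollectB (tl pl : List Char) : List Int → List Int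
  | [] => []
  | s :: rest =>
    if pvWinB tl s pl.length ≠ pl then []
    else s :: pvCollectB tl pl rest

def find_all_patterns_alt (text : String) (suffix_array : List Int) (pattern : String) : List Int :=
  match pvFindFirstB text.toList pattern.toList suffix_array 0 suffix_array.length none with
  | none => []
  | some first =>
    PySem.List.sorted
      (pvCollectB text.toList pattern.toList (PySem.List.slice suffix_array (some first) none))
      (fun x => x) false

-- ===== PRECONDITION & SPEC =====
-- Pre_ excludes suffix arrays containing a NEGATIVE entry: there A's value comes from
-- Python's accidental negative-slice wraparound (text[-1:] is the last character), which
-- is no behaviour of a suffix array; B reads an empty/ordinary window there instead.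
def Pre_find_all_patterns (text : String) (suffix_array : List Int) (pattern : String) : Prop :=
  ∀ s ∈ suffix_array, 0 ≤ s
instance (text : String) (suffix_array : List Int) (pattern : String) : Decidable (Pre_find_all_patterns text suffix_array pattern) := by unfold Pre_find_all_patterns; infer_instance

def pvWitness_find_all_patterns : String × List Int × String := ("banana", [5, 3, 1, 0, 4, 2], "an")

def Spec_find_all_patterns (text : String) (suffix_array : List Int) (pattern : String) (out : List Int) : Prop := out = find_all_patterns_alt text suffix_array pattern
instance (text : String) (suffix_array : List Int) (pattern : String) (out : List Int) : Decidable (Spec_find_all_patterns text suffix_array pattern out) := by unfold Spec_find_all_patterns; infer_instance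

-- ===== CLAIM (what is proved, stated in full; the proofs are below) =====
def Claim_equal_find_all_patterns : Prop := ∀ (text : String) (suffix_array : List Int) (pattern : String), Dom_find_all_patterns text suffix_array pattern → Pre_find_all_patterns text suffix_array pattern → Spec_find_all_patterns text suffix_array pattern (find_all_patterns text suffix_array pattern)

-- ===== LEMMAS AND PROOFS =====

-- A's suffix_prefix is take |pattern| of the suffix, in both branches
theorem pvSpA_eq_take (tl pl : List Char) (s : Int) :
    pvSpA tl pl s = (pvSuffixA tl s).take pl.length := by
  unfold pvSpA
  split_ifs with h
  · rw [PySem.List.slice_to_natCast]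
  · rw [List.take_of_length_le (by omega)]

-- for a nonnegative start, B's window is A's suffix_prefix
theorem pvWinB_eq (tl pl : List Char) (s : Int) (hs : 0 ≤ s) :
    pvWinB tl s pl.length = pvSpA tl pl s := by
  unfold pvWinB
  rw [pvSpA_eq_take]
  unfold pvSuffixA
  rw [PySem.List.slice_toNat tl hs (by omega), PySem.List.slice_from tl hs]
  congr 1
  omega

theorem pvStarts_iff (tl pl : List Char) (s : Int) (hs : 0 ≤ s) :
    (PySem.Chars.startswith (pvSuffixA tl s) pl = true) ↔ pvWinB tl s pl.length = pl := by
  rw [PySem.Chars.startswith_iff, List.prefix_iff_eq_take, pvWinB_eq tl pl s hs, pvSpA_eq_take]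
  exact ⟨fun h => h.symm, fun h => h.symm⟩

-- a nonnegative list read with a nonnegative default is nonnegative
theorem pvGetD_nonneg (sa : List Int) (i : Int) (hi : 0 ≤ i) (h : ∀ s ∈ sa, 0 ≤ s) :
    0 ≤ PySem.List.pyGetD sa i 0 := by
  rw [PySem.List.pyGetD_of_nonneg sa 0 hi]
  by_cases hlen : i.toNat < sa.length
  · rw [List.getD_eq_getElem sa 0 hlen]
    exact h _ (List.getElem_mem hlen)
  · rw [List.getD_eq_default sa 0 (by omega)]

-- the recorded best match is only read when the interval is empty
theorem pvFindFirstB_or (tl pl : List Char) (sa : List Int) :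
    ∀ width lo b, pvFindFirstB tl pl sa lo width b = (pvFindFirstB tl pl sa lo width none).or b := by
  intro width
  induction width using Nat.strong_induction_on with
  | _ width ih =>
    intro lo b
    match width with
    | 0 => simp [pvFindFirstB]
    | w + 1 =>
      rw [pvFindFirstB, pvFindFirstB]
      split_ifs with h1 h2
      · rw [ih (w / 2) (by omega)]
        cases pvFindFirstB tl pl sa lo (w / 2) none <;> simp
      · rw [ih (w / 2) (by omega)]
      · rw [ih (w - w / 2) (by omega)]

-- B's result, when found, lies at or beyond the left end of the interval
theorem pvFindFirstB_ge (tl pl : List Char) (sa : List Int) :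
    ∀ width (lo k : Int), pvFindFirstB tl pl sa lo width none = some k → lo ≤ k := by
  intro width
  induction width using Nat.strong_induction_on with
  | _ width ih =>
    intro lo k
    match width with
    | 0 => intro h; simp [pvFindFirstB] at h
    | w + 1 =>
      rw [pvFindFirstB]
      split_ifs with h1 h2
      · rw [pvFindFirstB_or]
        intro h
        cases hx : pvFindFirstB tl pl sa lo (w / 2) none with
        | none => rw [hx] at h; simp [Option.or] at h; omega
        | some k' =>
          rw [hx] at h; simp [Option.or] at h
          have := ih (w / 2) (by omega) lo k' hx
          omega
      · exact ih (w / 2) (by omega) lo k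
      · intro h
        have := ih (w - w / 2) (by omega) _ k h
        omega

-- A's binary-search midpoint, expressed through B's interval width
theorem pvMid_eq (left : Int) (w : Nat) :
    PySem.Int.floordiv (left + (left + (((w + 1 : Nat)) : Int) - 1)) 2 = left + ((w / 2 : Nat) : Int) := by
  rw [PySem.Int.floordiv_eq_iff_of_pos (by omega)]
  constructor <;> · push_cast; omega

-- A's binary search equals B's, through the encoding -1 / none
theorem pvSearch_eq (tl pl : List Char) (sa : List Int) (hsa : ∀ s ∈ sa, 0 ≤ s) :
    ∀ (width : Nat) (left f : Int), 0 ≤ left →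
      pvSearchA tl pl sa left (left + (width : Int) - 1) f
        = (pvFindFirstB tl pl sa left width none).getD f := by
  intro width
  induction width using Nat.strong_induction_on with
  | _ width ih =>
    intro left f hleft
    match width with
    | 0 =>
      rw [pvSearchA, dif_neg (by omega), pvFindFirstB]
      rfl
    | w + 1 =>
      have hmid := pvMid_eq left w
      have hmid' : (0 : Int) ≤ left + ((w / 2 : Nat) : Int) := by omega
      have hsel := pvGetD_nonneg sa _ hmid' hsa
      rw [pvSearchA, dif_pos (by push_cast; omega), pvFindFirstB, hmid]
      set s := PySem.List.pyGetD sa (left + ((w / 2 : Nat) : Int)) 0 with hs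
      have hwin := pvWinB_eq tl pl s hsel
      by_cases hEq : pvSpA tl pl s = pl
      · rw [if_pos (by rw [hEq]; exact fun hc => (List.lt_irrefl pl) hc), if_pos hEq,
            if_pos (by rw [hwin]; exact hEq)]
        rw [ih (w / 2) (by omega) left (left + ((w / 2 : Nat) : Int)) hleft,
            pvFindFirstB_or tl pl sa (w / 2) left (some (left + ((w / 2 : Nat) : Int)))]
        cases pvFindFirstB tl pl sa left (w / 2) none <;> simp
      · by_cases hLt : pl < pvSpA tl pl s
        · rw [if_pos (fun hc => (List.lt_irrefl pl) (List.lt_trans hLt hc)), if_neg hEq,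
              if_neg (by rw [hwin]; exact hEq), if_pos (by rw [hwin]; exact hLt)]
          exact ih (w / 2) (by omega) left f hleft
        · have hlt2 : pvSpA tl pl s < pl := by
            rcases lt_trichotomy (pvSpA tl pl s) pl with h | h | h
            · exact h
            · exact absurd h hEq
            · exact absurd h hLt
          rw [if_neg (by simpa using hlt2), if_neg (by rw [hwin]; exact hEq),
              if_neg (by rw [hwin]; exact hLt)]
          have := ih (w - w / 2) (by omega) (left + ((w / 2 : Nat) : Int) + 1) f (by omega)
          calc pvSearchA tl pl sa (left + ((w / 2 : Nat) : Int) + 1) (left + ((w : Int) + 1) - 1) f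
              = pvSearchA tl pl sa (left + ((w / 2 : Nat) : Int) + 1)
                  ((left + ((w / 2 : Nat) : Int) + 1) + (((w - w / 2 : Nat) : Int)) - 1) f := by
                congr 1
                push_cast
                omega
            _ = (pvFindFirstB tl pl sa (left + ((w / 2 : Nat) : Int) + 1) (w - w / 2) none).getD f := this

-- A's collection scan equals B's takewhile over the dropped tail
theorem pvScan_eq (tl pl : List Char) (sa : List Int) (hsa : ∀ s ∈ sa, 0 ≤ s) :
    ∀ (k : Nat) (i : Int) acc, 0 ≤ i → k = sa.length - i.toNat →
      pvScanA tl pl sa (sa.length : Int) i acc = acc ++ pvCollectB tl pl (sa.drop i.toNat) := by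
  intro k
  induction k with
  | zero =>
    intro i acc hi hk
    rw [pvScanA, dif_neg (by omega), List.drop_eq_nil_of_le (by omega), pvCollectB]
    simp
  | succ k ihk =>
    intro i acc hi hk
    by_cases hlt : i < (sa.length : Int)
    · have hidx : i.toNat < sa.length := by omega
      have hdrop := List.drop_eq_getElem_cons hidx
      have hget : PySem.List.pyGetD sa i 0 = sa[i.toNat] := by
        rw [PySem.List.pyGetD_of_nonneg sa 0 hi, List.getD_eq_getElem sa 0 hidx]
      have hmem : (0 : Int) ≤ sa[i.toNat] := hsa _ (List.getElem_mem hidx)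
      rw [pvScanA, dif_pos hlt, hdrop, pvCollectB]
      by_cases hsw : PySem.Chars.startswith (pvSuffixA tl (PySem.List.pyGetD sa i 0)) pl = true
      · have hw : pvWinB tl sa[i.toNat] pl.length = pl := by
          rw [← hget]
          exact (pvStarts_iff tl pl _ (hget ▸ hmem)).1 hsw
        rw [if_pos hsw, if_neg (by simpa using hw)]
        have := ihk (i + 1) (acc ++ [PySem.List.pyGetD sa i 0]) (by omega) (by omega)
        rw [this, hget]
        have : (i + 1).toNat = i.toNat + 1 := by omega
        rw [this]
        simp
      · have hw : ¬ pvWinB tl sa[i.toNat] pl.length = pl := by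
          intro hc
          exact hsw ((pvStarts_iff tl pl _ (hget ▸ hmem)).2 (hget ▸ hc))
        rw [if_neg hsw, if_pos (by simpa using hw)]
        simp
    · rw [pvScanA, dif_neg hlt, List.drop_eq_nil_of_le (by omega), pvCollectB]
      simp

-- ===== VERDICT (by name: the statement is the Claim_ definition above) =====
theorem find_all_patterns_spec : Claim_equal_find_all_patterns := by
  intro text sa pattern _ hpre
  unfold Spec_find_all_patterns find_all_patterns find_all_patterns_alt
  have hsearch := pvSearch_eq text.toList pattern.toList sa hpre sa.length 0 (-1) le_rfl
  have harg : (0 : Int) + (sa.length : Int) - 1 = (sa.length : Int) - 1 := by ring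
  rw [harg] at hsearch
  cases hB : pvFindFirstB text.toList pattern.toList sa 0 sa.length none with
  | none =>
    rw [hB] at hsearch
    simp only [hsearch, Option.getD]
    rfl
  | some k =>
    have hk : (0 : Int) ≤ k := pvFindFirstB_ge text.toList pattern.toList sa sa.length 0 k hB
    rw [hB] at hsearch
    simp only [Option.getD] at hsearch
    simp only [hsearch]
    rw [if_neg (by omega)]
    rw [pvScan_eq text.toList pattern.toList sa hpre (sa.length - k.toNat) k [] hk rfl,
        PySem.List.slice_from sa hk]
    simp
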